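-- pv_equiv track=rewrite | github.com/xSolomon/ads2 | ads2_5/solution5.py | nodes_except_one_inorder
-- ===== SOURCE A (Python) =====
-- def nodes_except_one_inorder(BBSTArray : list[int], current_node_index : int, exclude_key : int) -> list[int]:
--     ''' Returns all tree nodes excluding one key.
--         Uses inorder traversal. '''
--     result : list[int] = []
--     if current_node_index >= len(BBSTArray):
--         return result
--     if BBSTArray[current_node_index] is None:
--         return result
--     result.extend(nodes_except_one_inorder(
--         BBSTArray, current_node_index * 2 + 1, exclude_key)) # left subtree
--     if BBSTArray[current_node_index] != exclude_key:
--         result.append(BBSTArray[current_node_index])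
--     result.extend(nodes_except_one_inorder(
--         BBSTArray, current_node_index * 2 + 2, exclude_key)) # right subtree
--     return result
-- ===== SOURCE B (Python) =====
-- def nodes_except_one_inorder(BBSTArray : list[int], current_node_index : int, exclude_key : int) -> list[int]:
--     ''' Returns all tree nodes excluding one key.
--         Iterative inorder traversal with an explicit stack of indices. '''
--     def valid(i):
--         return 0 <= i < len(BBSTArray) and BBSTArray[i] is not None
--     result = []
--     stack = []
--     cur = current_node_index
--     while stack or valid(cur):
--         while valid(cur):
--             stack.append(cur)
--             cur = 2 * cur + 1
--         cur = stack.pop()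
--         v = BBSTArray[cur]
--         if v != exclude_key:
--             result.append(v)
--         cur = 2 * cur + 2
--     return result
-- ===== Notes on version B (the rewrite author's own statement) =====
-- stated objective: alternative
-- what changed: Replaces the recursive inorder traversal (which builds and concatenates sublists at every node) by an iterative inorder traversal with an explicit stack of indices and a single result accumulator.
-- outside the precondition, e.g. on nodes_except_one_inorder([None], -1, 0): A returns [], B returns []; on nodes_except_one_inorder([None, None, 1, None, None], -3, 0): A returns [1], B returns []; on nodes_except_one_inorder([1], -1, 0): A raises RecursionError, B returns []
import Mathlib
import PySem

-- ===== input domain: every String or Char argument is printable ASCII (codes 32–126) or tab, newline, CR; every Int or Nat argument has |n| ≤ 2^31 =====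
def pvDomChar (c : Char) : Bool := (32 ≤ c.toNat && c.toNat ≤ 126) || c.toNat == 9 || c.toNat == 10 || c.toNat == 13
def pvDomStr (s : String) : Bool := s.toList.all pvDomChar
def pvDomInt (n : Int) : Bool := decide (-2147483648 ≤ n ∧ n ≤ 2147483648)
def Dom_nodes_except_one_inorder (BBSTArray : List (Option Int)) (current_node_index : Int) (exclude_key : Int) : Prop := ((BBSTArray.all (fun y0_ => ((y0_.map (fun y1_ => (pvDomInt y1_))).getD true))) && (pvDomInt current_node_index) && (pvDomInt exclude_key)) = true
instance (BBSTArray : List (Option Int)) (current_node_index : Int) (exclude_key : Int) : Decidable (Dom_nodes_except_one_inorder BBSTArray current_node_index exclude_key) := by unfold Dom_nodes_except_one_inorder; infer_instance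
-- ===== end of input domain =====

-- B replaces A's recursive inorder traversal (concatenating sublists at every node) by an
-- iterative inorder traversal with an explicit stack of indices and one result accumulator
-- (objective: alternative decomposition, same asymptotic cost).

-- ===== PORT A =====
-- Fuel makes the recursion total in Lean; BBSTArray.length + 1 exceeds the recursion depth
-- on every input admitted by Pre_ (the index grows strictly at each recursive call).
def aGo (arr : List (Option Int)) (ex : Int) : Nat → Int → List Int
  | 0, _ => []
  | fuel+1, i =>
    if (arr.length : Int) ≤ i then []
    else
      match PySem.List.pyGet? arr i with
      | none => []            -- IndexError; unreachable under Pre_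
      | some none => []       -- BBSTArray[i] is None
      | some (some v) =>
        aGo arr ex fuel (2*i+1) ++ (if v ≠ ex then [v] else []) ++ aGo arr ex fuel (2*i+2)

def nodes_except_one_inorder (BBSTArray : List (Option Int)) (current_node_index : Int) (exclude_key : Int) : List Int :=
  aGo BBSTArray exclude_key (BBSTArray.length + 1) current_node_index

-- ===== PORT B =====
-- valid(i) of Source B
def validB (arr : List (Option Int)) (i : Int) : Bool :=
  decide (0 ≤ i) && decide (i < (arr.length : Int)) && (arr.getD i.toNat none).isSome

-- the inner `while valid(cur): push; cur = 2*cur+1` loop; fuel BBSTArray.length + 1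
-- exceeds the number of pushes (pushed indices are distinct and in range)
def bDescend (arr : List (Option Int)) : Nat → List Int → Int → List Int × Int
  | 0, st, cur => (st, cur)
  | f+1, st, cur => if validB arr cur then bDescend arr f (cur :: st) (2*cur+1) else (st, cur)

-- number of valid nodes of the subtree rooted at i (fuel bound for the outer loop;
-- its own fuel arr.length + 1 exceeds the subtree depth)
def countC (arr : List (Option Int)) : Nat → Int → Nat
  | 0, _ => 0
  | f+1, i => if validB arr i then 1 + countC arr f (2*i+1) + countC arr f (2*i+2) else 0

-- the outer `while stack or valid(cur)` loop of Source B; each iteration pops one node, so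
-- the number of valid nodes of the start subtree + 1 is enough fuel
def bLoop (arr : List (Option Int)) (ex : Int) : Nat → List Int → Int → List Int → List Int
  | 0, _, _, res => res
  | f+1, st, cur, res =>
    if !st.isEmpty || validB arr cur then
      match bDescend arr (arr.length + 1) st cur with
      | ([], _) => res        -- unreachable: the loop guard guarantees a nonempty stack
      | (top :: rest, _) =>
        match arr.getD top.toNat none with
        | none => res         -- unreachable: only valid indices are pushed
        | some v => bLoop arr ex f rest (2*top+2) (if v ≠ ex then res ++ [v] else res)
    else res

def nodes_except_one_inorder_alt (BBSTArray : List (Option Int)) (current_node_index : Int) (exclude_key : Int) : List Int :=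
  bLoop BBSTArray exclude_key (countC BBSTArray (BBSTArray.length + 1) current_node_index + 1) [] current_node_index []

-- ===== PRECONDITION & SPEC =====
-- Pre_ excludes negative start indices (outside the natural array-BST index domain): there
-- Python A either raises RecursionError/IndexError or returns via accidental negative-index
-- wraparound, while B treats any out-of-range index as an absent node.
def Pre_nodes_except_one_inorder (BBSTArray : List (Option Int)) (current_node_index : Int) (exclude_key : Int) : Prop :=
  0 ≤ current_node_index
instance (BBSTArray : List (Option Int)) (current_node_index : Int) (exclude_key : Int) : Decidable (Pre_nodes_except_one_inorder BBSTArray current_node_index exclude_key) := by unfold Pre_nodes_except_one_inorder; infer_instance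

def pvWitness_nodes_except_one_inorder : List (Option Int) × Int × Int := ([some 2, some 1, some 3], 0, 1)

def Spec_nodes_except_one_inorder (BBSTArray : List (Option Int)) (current_node_index : Int) (exclude_key : Int) (out : List Int) : Prop := out = nodes_except_one_inorder_alt BBSTArray current_node_index exclude_key
instance (BBSTArray : List (Option Int)) (current_node_index : Int) (exclude_key : Int) (out : List Int) : Decidable (Spec_nodes_except_one_inorder BBSTArray current_node_index exclude_key out) := by unfold Spec_nodes_except_one_inorder; infer_instance

-- ===== CLAIM (what is proved, stated in full; the proofs are below) =====
def Claim_equal_nodes_except_one_inorder : Prop := ∀ (BBSTArray : List (Option Int)) (current_node_index : Int) (exclude_key : Int), Dom_nodes_except_one_inorder BBSTArray current_node_index exclude_key → Pre_nodes_except_one_inorder BBSTArray current_node_index exclude_key → Spec_nodes_except_one_inorder BBSTArray current_node_index exclude_key (nodes_except_one_inorder BBSTArray current_node_index exclude_key)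

-- ===== LEMMAS AND PROOFS =====

theorem validB_dec_left (arr : List (Option Int)) (i : Int) (h : validB arr i = true) :
    arr.length - (2*i+1).toNat < arr.length - i.toNat := by
  simp [validB] at h; omega

theorem validB_dec_right (arr : List (Option Int)) (i : Int) (h : validB arr i = true) :
    arr.length - (2*i+2).toNat < arr.length - i.toNat := by
  simp [validB] at h; omega

-- fuel-free specification of the inorder traversal, shared target of both ports
def visitV (arr : List (Option Int)) (ex : Int) (s : Int) : List Int :=
  match arr.getD s.toNat none with
  | some v => if v ≠ ex then [v] else []
  | none => []

def inordT (arr : List (Option Int)) (ex : Int) (i : Int) : List Int :=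
  if h : validB arr i = true then
    inordT arr ex (2*i+1) ++ visitV arr ex i ++ inordT arr ex (2*i+2)
  else []
termination_by arr.length - i.toNat
decreasing_by
  · exact validB_dec_left arr i h
  · exact validB_dec_right arr i h

def flatT (arr : List (Option Int)) (ex : Int) (st : List Int) : List Int :=
  st.foldr (fun s acc => visitV arr ex s ++ inordT arr ex (2*s+2) ++ acc) []

-- per-stack count used as the loop measure
def sumS (arr : List (Option Int)) (st : List Int) : Nat :=
  st.foldr (fun s acc => 1 + countC arr (arr.length + 1) (2*s+2) + acc) 0

theorem countC_stable (arr : List (Option Int)) :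
    ∀ (f g : Nat) (i : Int), arr.length - i.toNat < f → arr.length - i.toNat < g →
      countC arr f i = countC arr g i := by
  intro f
  induction f with
  | zero => intro g i hf; omega
  | succ f ih =>
    intro g i hf hg
    cases g with
    | zero => omega
    | succ g =>
      rw [countC, countC]
      by_cases hv : validB arr i = true
      · rw [if_pos hv, if_pos hv]
        have h1 := validB_dec_left arr i hv
        have h2 := validB_dec_right arr i hv
        rw [ih g (2*i+1) (by omega) (by omega), ih g (2*i+2) (by omega) (by omega)]
      · rw [if_neg hv, if_neg hv]

theorem countC_unfold_valid (arr : List (Option Int)) (i : Int) (h : validB arr i = true) :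
    countC arr (arr.length + 1) i
      = 1 + countC arr (arr.length + 1) (2*i+1) + countC arr (arr.length + 1) (2*i+2) := by
  rw [countC, if_pos h]
  have h1 := validB_dec_left arr i h
  have h2 := validB_dec_right arr i h
  rw [countC_stable arr arr.length (arr.length + 1) (2*i+1) (by omega) (by omega),
      countC_stable arr arr.length (arr.length + 1) (2*i+2) (by omega) (by omega)]

theorem bDescend_measure (arr : List (Option Int)) :
    ∀ (f : Nat) (st : List Int) (cur : Int),
      countC arr (arr.length + 1) (bDescend arr f st cur).2 + sumS arr (bDescend arr f st cur).1
        = countC arr (arr.length + 1) cur + sumS arr st := by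
  intro f
  induction f with
  | zero => intro st cur; rfl
  | succ f ih =>
    intro st cur
    rw [bDescend]
    by_cases h : validB arr cur = true
    · rw [if_pos h, ih, countC_unfold_valid arr cur h]
      simp [sumS]
      omega
    · rw [if_neg h]

theorem aGo_eq_inordT (arr : List (Option Int)) (ex : Int) :
    ∀ (f : Nat) (i : Int), 0 ≤ i → arr.length - i.toNat < f →
      aGo arr ex f i = inordT arr ex i := by
  intro f
  induction f with
  | zero => intro i _ hf; omega
  | succ f ih =>
    intro i hi hf
    rw [aGo]
    by_cases hlen : (arr.length : Int) ≤ i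
    · rw [if_pos hlen, inordT, dif_neg]
      simp [validB]; omega
    · rw [if_neg hlen]
      have hidx : i.toNat < arr.length := by omega
      have hget : PySem.List.pyGet? arr i = some (arr[i.toNat]) := by
        rw [PySem.List.pyGet?_of_nonneg arr hi]
        simp [List.getElem?_eq_getElem hidx]
      cases hv : arr[i.toNat] with
      | none =>
        rw [hv] at hget
        rw [hget]
        rw [inordT, dif_neg]
        simp [validB, List.getD_eq_getElem?_getD, List.getElem?_eq_getElem hidx, hv]
      | some v =>
        rw [hv] at hget
        rw [hget]
        have hvalid : validB arr i = true := by
          simp [validB, List.getD_eq_getElem?_getD, List.getElem?_eq_getElem hidx, hv]; omega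
        rw [inordT, dif_pos hvalid]
        rw [ih (2*i+1) (by omega) (by omega), ih (2*i+2) (by omega) (by omega)]
        have : visitV arr ex i = if v ≠ ex then [v] else [] := by
          simp only [visitV]
          rw [List.getD_eq_getElem?_getD, List.getElem?_eq_getElem hidx, hv]
          rfl
        rw [this]

theorem bDescend_spec (arr : List (Option Int)) (ex : Int) :
    ∀ (f : Nat) (st : List Int) (cur : Int) (st' : List Int) (c' : Int),
      0 ≤ cur → arr.length - cur.toNat < f →
      (∀ s ∈ st, validB arr s = true) →
      bDescend arr f st cur = (st', c') →
      inordT arr ex cur ++ flatT arr ex st = flatT arr ex st' ∧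
      (∀ s ∈ st', validB arr s = true) := by
  intro f
  induction f with
  | zero => intro st cur st' c' _ hf; omega
  | succ f ih =>
    intro st cur st' c' hcur hf hst heq
    rw [bDescend] at heq
    by_cases hv : validB arr cur = true
    · rw [if_pos hv] at heq
      have hbound : cur.toNat < arr.length := by
        simp [validB] at hv; omega
      have hrec := ih (cur :: st) (2*cur+1) st' c' (by omega) (by omega)
        (by intro s hs
            simp only [List.mem_cons] at hs
            rcases hs with rfl | hmem
            · exact hv
            · exact hst s hmem) heq
      refine ⟨?_, hrec.2⟩
      rw [← hrec.1, inordT, dif_pos hv]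
      simp [flatT]
    · rw [if_neg hv] at heq
      injection heq with h1 h2
      subst h1
      refine ⟨?_, hst⟩
      rw [inordT, dif_neg hv]
      simp

theorem bLoop_spec (arr : List (Option Int)) (ex : Int) :
    ∀ (f : Nat) (st : List Int) (cur : Int) (res : List Int),
      countC arr (arr.length + 1) cur + sumS arr st < f →
      0 ≤ cur →
      (∀ s ∈ st, validB arr s = true) →
      bLoop arr ex f st cur res = res ++ inordT arr ex cur ++ flatT arr ex st := by
  intro f
  induction f with
  | zero => intro st cur res hf; omega
  | succ f ih =>
    intro st cur res hf hcur hst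
    rw [bLoop]
    by_cases hcond : (!st.isEmpty || validB arr cur) = true
    · rw [if_pos hcond]
      have hmes := bDescend_measure arr (arr.length + 1) st cur
      cases hdes : bDescend arr (arr.length + 1) st cur with
      | mk st' c' =>
        rw [hdes] at hmes
        have hd := bDescend_spec arr ex (arr.length + 1) st cur st' c' hcur (by omega) hst hdes
        cases st' with
        | nil =>
          have h0 : inordT arr ex cur ++ flatT arr ex st = [] := by
            simpa [flatT] using hd.1
          simp [List.append_assoc, h0]
        | cons top rest =>
          have htop : validB arr top = true := hd.2 top (by simp)
          have htopnn : 0 ≤ top := by simp [validB] at htop; omega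
          have hsome : (arr.getD top.toNat none).isSome = true := by
            simp [validB] at htop; exact htop.2
          cases helem : arr.getD top.toNat none with
          | none => rw [helem] at hsome; simp at hsome
          | some v =>
            have hrest : ∀ s ∈ rest, validB arr s = true := fun s hs => hd.2 s (by simp [hs])
            have hmes' : countC arr (arr.length + 1) (2*top+2) + sumS arr rest
                < countC arr (arr.length + 1) cur + sumS arr st := by
              simp [sumS] at hmes ⊢; omega
            have hih := ih rest (2*top+2) (if v ≠ ex then res ++ [v] else res)
              (by omega) (by omega) hrest
            simp only [helem]
            rw [hih]
            have hflat : flatT arr ex (top :: rest)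
                = visitV arr ex top ++ inordT arr ex (2*top+2) ++ flatT arr ex rest := by
              simp [flatT]
            have hvis : visitV arr ex top = if v ≠ ex then [v] else [] := by
              simp only [visitV]
              rw [helem]
            rw [List.append_assoc res (inordT arr ex cur), hd.1, hflat, hvis]
            by_cases hne : v ≠ ex <;> simp [hne, List.append_assoc]
    · rw [if_neg hcond]
      have hemp : st = [] := by
        cases st with
        | nil => rfl
        | cons a l => exact absurd (by simp) hcond
      have hval : ¬ validB arr cur = true := by
        intro hvb
        exact hcond (by simp [hvb])
      subst hemp
      rw [inordT, dif_neg hval]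
      simp [flatT]

-- ===== VERDICT (by name: the statement is the Claim_ definition above) =====
theorem nodes_except_one_inorder_spec : Claim_equal_nodes_except_one_inorder := by
  intro arr i ex _hdom hpre
  unfold Spec_nodes_except_one_inorder nodes_except_one_inorder nodes_except_one_inorder_alt
  rw [aGo_eq_inordT arr ex (arr.length + 1) i hpre (by omega)]
  rw [bLoop_spec arr ex (countC arr (arr.length + 1) i + 1) [] i []
    (by simp [sumS]) hpre (by intro s hs; simp at hs)]
  simp [flatT]
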